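-- pv_equiv track=rewrite | github.com/bennydan7/A2SV | contests/D_Repeating_Cipher.py | decrypt_repeating_cipher
-- ===== SOURCE A (Python) =====
-- def decrypt_repeating_cipher(n, t):
--     s = []
--     index = 0
--     for i in range(1, n + 1):
--         if index < n:
--             s.append(t[index])
--             index += i
--         else:
--             break
--     return ''.join(s)
-- ===== SOURCE B (Python) =====
-- def decrypt_repeating_cipher(n, t):
--     pieces = []
--     rest = t
--     remaining = n
--     step = 1
--     while remaining > 0:
--         pieces.append(rest[0])
--         rest = rest[step:]
--         remaining -= step
--         step += 1
--     return ''.join(pieces)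
-- ===== Notes on version B (the rewrite author's own statement) =====
-- stated objective: alternative
-- what changed: B never indexes into t at computed positions: it consumes the string itself, peeling off a growing chunk each round (take the head, slice the rest off) while a remaining budget counts n down, instead of A's for-loop over range(1,n+1) with a running index accumulator and break.
import Mathlib
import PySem

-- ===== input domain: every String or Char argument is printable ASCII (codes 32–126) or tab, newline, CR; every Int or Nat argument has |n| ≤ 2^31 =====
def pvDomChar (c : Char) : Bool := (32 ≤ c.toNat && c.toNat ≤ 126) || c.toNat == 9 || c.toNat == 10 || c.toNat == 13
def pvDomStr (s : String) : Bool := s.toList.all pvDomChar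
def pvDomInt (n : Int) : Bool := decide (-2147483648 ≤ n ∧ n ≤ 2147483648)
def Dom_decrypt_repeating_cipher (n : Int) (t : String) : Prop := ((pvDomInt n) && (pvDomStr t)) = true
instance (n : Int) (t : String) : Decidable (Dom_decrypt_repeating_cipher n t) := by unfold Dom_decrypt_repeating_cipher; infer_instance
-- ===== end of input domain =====

-- B never indexes into t at computed positions: it consumes the string itself, peeling a
-- growing chunk off per round while a remaining budget counts n down (objective: alternative).
-- Outside Pre_ both Pythons raise IndexError; the ports totalize the indexing with a default ' '.

-- ===== PORT A =====
-- A's loop body: st = (collected chars s, index); break is modelled by the state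
-- being left unchanged once index ≥ n (index never changes after that, so the
-- remaining iterations are no-ops, exactly as a break).
def pvStepA (n : Int) (t : String) (st : List Char × Int) (i : Int) : List Char × Int :=
  if st.2 < n then (st.1 ++ [(PySem.Str.pyGet? t st.2).getD ' '], st.2 + i) else st

def decrypt_repeating_cipher (n : Int) (t : String) : String :=
  String.mk (((PySem.List.pyRange 1 (n + 1) 1).foldl (pvStepA n t) ([], 0)).1)

-- ===== PORT B =====
-- the while-loop of Source B over state (rest, remaining, step); rest[0] is pyGet? rest 0
-- (totalized with ' ': Python raises there, excluded by Pre_), rest[step:] is slice.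
-- Fuel n.toNat suffices: remaining drops by step ≥ 1 each round, so at most n rounds
-- (fuel running out and the while-condition failing both return []).
def pvBLoop (rest : List Char) (remaining step : Int) : Nat → List Char
  | 0 => []
  | fuel + 1 =>
    if remaining > 0 then
      (PySem.List.pyGet? rest 0).getD ' '
        :: pvBLoop (PySem.List.slice rest (some step) none) (remaining - step) (step + 1) fuel
    else []

def decrypt_repeating_cipher_alt (n : Int) (t : String) : String :=
  String.mk (pvBLoop t.toList n 1 n.toNat)

-- ===== PRECONDITION & SPEC =====
def pvTri (k : Int) : Int := PySem.Int.floordiv (k * (k + 1)) 2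

-- Pre_ excludes exactly the inputs where Python A raises IndexError: some visited
-- triangular position k*(k+1)//2 < n falls at or beyond the end of t.  Since the
-- triangular numbers are increasing and pvTri k ≥ k for k ≥ 0, checking
-- k < len(t)+2 is equivalent to checking all k ≥ 0 (the first offending k, if
-- any, satisfies pvTri k ≤ pvTri (len+1), and k = len+1 already has pvTri k > len).
def Pre_decrypt_repeating_cipher (n : Int) (t : String) : Prop :=
  ∀ k ∈ List.range (t.toList.length + 2), pvTri k < n → pvTri k < (t.toList.length : Int)
instance (n : Int) (t : String) : Decidable (Pre_decrypt_repeating_cipher n t) := by unfold Pre_decrypt_repeating_cipher; infer_instance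

def pvWitness_decrypt_repeating_cipher : Int × String := (3, "abc")

def Spec_decrypt_repeating_cipher (n : Int) (t : String) (out : String) : Prop := out = decrypt_repeating_cipher_alt n t
instance (n : Int) (t : String) (out : String) : Decidable (Spec_decrypt_repeating_cipher n t out) := by unfold Spec_decrypt_repeating_cipher; infer_instance

-- ===== CLAIM (what is proved, stated in full; the proofs are below) =====
def Claim_equal_decrypt_repeating_cipher : Prop := ∀ (n : Int) (t : String), Dom_decrypt_repeating_cipher n t → Pre_decrypt_repeating_cipher n t → Spec_decrypt_repeating_cipher n t (decrypt_repeating_cipher n t)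

-- ===== LEMMAS AND PROOFS =====

-- once index ≥ n, A's fold leaves the state untouched (the break)
theorem pvStuck (n : Int) (t : String) (l : List Int) (acc : List Char) (idx : Int)
    (h : ¬ idx < n) : l.foldl (pvStepA n t) (acc, idx) = (acc, idx) := by
  induction l with
  | nil => rfl
  | cons x xs ih => simpa [pvStepA, h] using ih

theorem pvTri_succ (k : Int) : pvTri k + (k + 1) = pvTri (k + 1) := by
  have hd : ∀ a : Int, PySem.Int.floordiv a 2 = a / 2 :=
    fun a => PySem.Int.floordiv_eq_ediv_of_pos (by omega)
  rcases Int.even_mul_succ_self k with ⟨m, hm⟩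
  have h2 : (k + 1) * (k + 1 + 1) = (m + k + 1) + (m + k + 1) := by nlinarith
  simp only [pvTri, hd, hm, h2]
  omega

theorem pvTri_nonneg (k : Int) (hk : 0 ≤ k) : 0 ≤ pvTri k := by
  have hd : PySem.Int.floordiv (k * (k + 1)) 2 = (k * (k + 1)) / 2 :=
    PySem.Int.floordiv_eq_ediv_of_pos (by omega)
  have hm : 0 ≤ k * (k + 1) := mul_nonneg hk (by omega)
  simp only [pvTri, hd]
  exact Int.ediv_nonneg hm (by omega)

-- alignment of A's fold over [k+1, …, k+m] with B's while-loop: its rest is the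
-- suffix of t from the current triangular position, its budget is n minus it.
theorem pvAlign (n : Int) (t : String) :
    ∀ (m : Nat) (k : Int), 0 ≤ k → ∀ (acc : List Char),
      ((PySem.List.pyRange (k + 1) (k + 1 + m) 1).foldl (pvStepA n t) (acc, pvTri k)).1
        = acc ++ pvBLoop (t.toList.drop (pvTri k).toNat) (n - pvTri k) (k + 1) m := by
  intro m
  induction m with
  | zero =>
    intro k hk acc
    rw [PySem.List.pyRange_one_eq_nil (by push_cast; omega : k + 1 + ((0:Nat):Int) ≤ k + 1)]
    simp [pvBLoop]
  | succ m ih =>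
    intro k hk acc
    rw [PySem.List.pyRange_one_cons (by push_cast; omega : k + 1 < k + 1 + ((m : Nat) + 1 : Nat))]
    have htri := pvTri_succ k
    have h0 := pvTri_nonneg k hk
    have h1 := pvTri_nonneg (k + 1) (by omega)
    by_cases h : pvTri k < n
    · -- heads agree: A reads t[tri k], B reads the head of t.toList.drop (tri k)
      have hhd : (PySem.Str.pyGet? t (pvTri k)).getD ' '
          = (PySem.List.pyGet? (t.toList.drop (pvTri k).toNat) 0).getD ' ' := by
        rw [PySem.List.pyGet?_zero]
        rw [List.getElem?_drop]
        have : PySem.Str.pyGet? t (pvTri k) = t.toList[((pvTri k).toNat + 0)]? := by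
          simp [PySem.Str.pyGet?, PySem.List.pyGet?_of_nonneg t.toList h0]
        rw [this]
      have hstep : pvStepA n t (acc, pvTri k) (k + 1)
          = (acc ++ [(PySem.Str.pyGet? t (pvTri k)).getD ' '], pvTri (k + 1)) := by
        simp [pvStepA, h, htri]
      have hrange : k + 1 + ((m : Nat) + 1 : Nat) = (k + 1) + 1 + (m : Nat) := by
        push_cast; ring
      rw [List.foldl_cons, hstep, hrange, ih (k + 1) (by omega)]
      -- unfold one round of B's loop and line its state up with tri (k+1)
      have hrest : PySem.List.slice (t.toList.drop (pvTri k).toNat) (some (k + 1)) none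
          = t.toList.drop (pvTri (k + 1)).toNat := by
        rw [PySem.List.slice_from _ (by omega : (0:Int) ≤ k + 1), List.drop_drop]
        congr 1
        omega
      have hrem : n - pvTri k - (k + 1) = n - pvTri (k + 1) := by omega
      simp only [pvBLoop, if_pos (by omega : n - pvTri k > 0), hrest, hrem, hhd]
      simp
    · rw [List.foldl_cons]
      simp only [pvStepA, h, if_false]
      rw [pvStuck n t _ acc (pvTri k) h]
      simp only [pvBLoop, if_neg (by omega : ¬ n - pvTri k > 0)]
      simp

-- ===== VERDICT (by name: the statement is the Claim_ definition above) =====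
theorem decrypt_repeating_cipher_spec : Claim_equal_decrypt_repeating_cipher := by
  intro n t _ _
  unfold Spec_decrypt_repeating_cipher decrypt_repeating_cipher decrypt_repeating_cipher_alt
  have h0 : pvTri 0 = 0 := by decide
  by_cases hn : 0 ≤ n
  · have key := pvAlign n t n.toNat 0 le_rfl []
    rw [h0] at key
    have hb : (0 : Int) + 1 + (n.toNat : Nat) = n + 1 := by omega
    rw [hb] at key
    norm_num at key
    rw [key]
  · have h1 : PySem.List.pyRange 1 (n + 1) 1 = [] :=
      PySem.List.pyRange_one_eq_nil (by omega)
    have h2 : n.toNat = 0 := by omega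
    simp [h1, h2, pvBLoop]
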